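-- pv_equiv track=rewrite | github.com/g-nitin/PaTS | data/parse_and_encode_gr.py | get_ordered_predicate_list
-- ===== SOURCE A (Python) =====
-- def get_ordered_predicate_list(num_robots, num_rooms, num_objects):
--     """
--     Generates a fixed, ordered list of all possible predicates for the Grippers domain.
--     """
--     robots = [f"robot{i + 1}" for i in range(num_robots)]
--     rooms = [f"room{i + 1}" for i in range(num_rooms)]
--     objects = [f"ball{i + 1}" for i in range(num_objects)]
--     # Generate actual gripper object names for each robot
--     grippers = []
--     for i in range(num_robots):
--         grippers.append(f"lgripper{i + 1}")
--         grippers.append(f"rgripper{i + 1}")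
--     predicates = []
--
--     # (at-robby ?r - robot ?x - room)
--     for r_name in robots:
--         for rm_name in rooms:
--             predicates.append(f"(at-robby {r_name} {rm_name})")
--
--     # (at ?o - object ?x - room)
--     for o_name in objects:
--         for rm_name in rooms:
--             predicates.append(f"(at {o_name} {rm_name})")
--
--     # (free ?r - robot ?g - gripper)
--     for r_name in robots:
--         for g_name in grippers:
--             predicates.append(f"(free {r_name} {g_name})")
--
--     # (carry ?r - robot ?o - object ?g - gripper)
--     for r_name in robots:
--         for o_name in objects:
--             for g_name in grippers:
--                 predicates.append(f"(carry {r_name} {o_name} {g_name})")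
--
--     return predicates
-- ===== SOURCE B (Python) =====
-- def get_ordered_predicate_list(num_robots, num_rooms, num_objects):
--     """Schema-driven re-implementation: one data-driven pass over the predicate table."""
--     robots = [f"robot{i + 1}" for i in range(num_robots)]
--     rooms = [f"room{i + 1}" for i in range(num_rooms)]
--     objects = [f"ball{i + 1}" for i in range(num_objects)]
--     grippers = [f"{side}gripper{i + 1}" for i in range(num_robots) for side in ("l", "r")]
--     specs = [
--         ("at-robby", [robots, rooms]),
--         ("at", [objects, rooms]),
--         ("free", [robots, grippers]),
--         ("carry", [robots, objects, grippers]),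
--     ]
--     predicates = []
--     for name, groups in specs:
--         parts = ["(" + name]
--         for group in groups:
--             parts = [p + " " + x for p in parts for x in group]
--         predicates.extend(p + ")" for p in parts)
--     return predicates
-- ===== Notes on version B (the rewrite author's own statement) =====
-- stated objective: simpler
-- what changed: Replaces the four hardcoded nested-loop blocks with one data-driven pass over a predicate schema table, expanding each schema's argument groups with a generic cartesian-product helper and joining each combination into the predicate string.
import Mathlib
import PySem

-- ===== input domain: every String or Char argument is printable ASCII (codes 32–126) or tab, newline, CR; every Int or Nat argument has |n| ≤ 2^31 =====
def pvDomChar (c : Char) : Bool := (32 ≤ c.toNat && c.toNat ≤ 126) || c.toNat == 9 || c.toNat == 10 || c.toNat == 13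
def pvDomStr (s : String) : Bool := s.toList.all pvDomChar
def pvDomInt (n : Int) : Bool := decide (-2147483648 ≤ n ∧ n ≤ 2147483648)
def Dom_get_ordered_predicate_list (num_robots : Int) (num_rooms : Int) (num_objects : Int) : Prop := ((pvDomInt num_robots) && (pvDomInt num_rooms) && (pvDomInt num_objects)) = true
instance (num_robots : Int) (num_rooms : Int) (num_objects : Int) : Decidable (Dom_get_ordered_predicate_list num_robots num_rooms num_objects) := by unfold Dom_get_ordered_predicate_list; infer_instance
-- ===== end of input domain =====

-- B replaces A's four hardcoded nested-loop blocks with one data-driven pass over a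
-- predicate schema table expanded by a generic cartesian-product helper (objective: simpler).

-- ===== PORT A =====
def get_ordered_predicate_list (num_robots : Int) (num_rooms : Int) (num_objects : Int) : List String :=
  let robots := (PySem.List.pyRange 0 num_robots 1).map (fun i => "robot" ++ PySem.Int.toStr (i + 1))
  let rooms := (PySem.List.pyRange 0 num_rooms 1).map (fun i => "room" ++ PySem.Int.toStr (i + 1))
  let objects := (PySem.List.pyRange 0 num_objects 1).map (fun i => "ball" ++ PySem.Int.toStr (i + 1))
  let grippers := (PySem.List.pyRange 0 num_robots 1).foldl
    (fun acc i => acc ++ ["lgripper" ++ PySem.Int.toStr (i + 1)] ++ ["rgripper" ++ PySem.Int.toStr (i + 1)]) []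
  let p1 := robots.foldl (fun acc r_name =>
    rooms.foldl (fun acc rm_name => acc ++ ["(at-robby " ++ r_name ++ " " ++ rm_name ++ ")"]) acc) []
  let p2 := objects.foldl (fun acc o_name =>
    rooms.foldl (fun acc rm_name => acc ++ ["(at " ++ o_name ++ " " ++ rm_name ++ ")"]) acc) p1
  let p3 := robots.foldl (fun acc r_name =>
    grippers.foldl (fun acc g_name => acc ++ ["(free " ++ r_name ++ " " ++ g_name ++ ")"]) acc) p2
  let p4 := robots.foldl (fun acc r_name =>
    objects.foldl (fun acc o_name =>
      grippers.foldl (fun acc g_name => acc ++ ["(carry " ++ r_name ++ " " ++ o_name ++ " " ++ g_name ++ ")"]) acc) acc) p3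
  p4

-- ===== PORT B =====
-- expand the partial predicate strings by one argument group (Source B's inner comprehension)
def pvExpand (parts : List String) (group : List String) : List String :=
  parts.flatMap (fun p => group.map (fun x => p ++ " " ++ x))

def get_ordered_predicate_list_alt (num_robots : Int) (num_rooms : Int) (num_objects : Int) : List String :=
  let robots := (PySem.List.pyRange 0 num_robots 1).map (fun i => "robot" ++ PySem.Int.toStr (i + 1))
  let rooms := (PySem.List.pyRange 0 num_rooms 1).map (fun i => "room" ++ PySem.Int.toStr (i + 1))
  let objects := (PySem.List.pyRange 0 num_objects 1).map (fun i => "ball" ++ PySem.Int.toStr (i + 1))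
  let grippers := (PySem.List.pyRange 0 num_robots 1).flatMap
    (fun i => ["l", "r"].map (fun side => side ++ "gripper" ++ PySem.Int.toStr (i + 1)))
  let specs : List (String × List (List String)) :=
    [("at-robby", [robots, rooms]),
     ("at", [objects, rooms]),
     ("free", [robots, grippers]),
     ("carry", [robots, objects, grippers])]
  specs.foldl (fun predicates spec =>
    predicates ++ (spec.2.foldl pvExpand ["(" ++ spec.1]).map (fun p => p ++ ")")) []

-- ===== PRECONDITION & SPEC =====
def Spec_get_ordered_predicate_list (num_robots : Int) (num_rooms : Int) (num_objects : Int) (out : List String) : Prop := out = get_ordered_predicate_list_alt num_robots num_rooms num_objects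
instance (num_robots : Int) (num_rooms : Int) (num_objects : Int) (out : List String) : Decidable (Spec_get_ordered_predicate_list num_robots num_rooms num_objects out) := by unfold Spec_get_ordered_predicate_list; infer_instance

-- ===== CLAIM (what is proved, stated in full; the proofs are below) =====
def Claim_equal_get_ordered_predicate_list : Prop := ∀ (num_robots : Int) (num_rooms : Int) (num_objects : Int), Dom_get_ordered_predicate_list num_robots num_rooms num_objects → Spec_get_ordered_predicate_list num_robots num_rooms num_objects (get_ordered_predicate_list num_robots num_rooms num_objects)

-- ===== LEMMAS AND PROOFS =====

-- pvExpand applied twice to a singleton seed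
theorem pv_expand_two (s : String) (xs ys : List String) :
    pvExpand (pvExpand [s] xs) ys = xs.flatMap (fun x => ys.map (fun y => s ++ " " ++ x ++ " " ++ y)) := by
  simp [pvExpand, List.flatMap_map, String.append_assoc]

-- pvExpand applied three times to a singleton seed
theorem pv_expand_three (s : String) (xs ys zs : List String) :
    pvExpand (pvExpand (pvExpand [s] xs) ys) zs =
      xs.flatMap (fun x => ys.flatMap (fun y => zs.map (fun z => s ++ " " ++ x ++ " " ++ y ++ " " ++ z))) := by
  simp [pvExpand, List.flatMap_map, List.flatMap_assoc, String.append_assoc]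

-- ===== VERDICT (by name: the statement is the Claim_ definition above) =====
theorem get_ordered_predicate_list_spec : Claim_equal_get_ordered_predicate_list := by
  intro nr nm no _
  unfold Spec_get_ordered_predicate_list
  simp only [get_ordered_predicate_list, get_ordered_predicate_list_alt]
  simp only [List.append_assoc, List.singleton_append]
  simp only [PySem.List.foldl_append_singleton_eq_map, PySem.List.foldl_append_eq_flatMap]
  simp [List.foldl, List.map_flatMap, List.map_map, List.flatMap_map]
  rw [pv_expand_two, pv_expand_two, pv_expand_two, pv_expand_three]
  simp [List.map_flatMap, List.flatMap_map, List.map_map, Function.comp_def, String.append_assoc]
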